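-- pv_equiv track=rewrite | github.com/FoundationDB/fdb-record-layer | build/versionutils.py | incremented_version
-- ===== SOURCE A (Python) =====
-- VERSION_POSITIONS = ['MAJOR', 'MINOR', 'BUILD', 'PATCH']
--
-- def incremented_version(version: tuple[int, int, int, int], update_type: str) -> tuple[int, int, int, int]:
--     update_pos = VERSION_POSITIONS.index(update_type)
--     new_version = []
--     for i in range(len(version)):
--         if i < update_pos:
--             new_version.append(version[i])
--         elif i == update_pos:
--             new_version.append(version[i] + 1)
--         else:
--             new_version.append(0)
--     return tuple(new_version)
-- ===== SOURCE B (Python) =====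
-- VERSION_POSITIONS = ['MAJOR', 'MINOR', 'BUILD', 'PATCH']
--
-- # Branch-free arithmetic formulation: a precomputed table maps each update type
-- # to a (keep, bump) mask pair; the result is the elementwise v*keep + bump.
-- _MASKS = {
--     'MAJOR': ((1, 0, 0, 0), (1, 0, 0, 0)),
--     'MINOR': ((1, 1, 0, 0), (0, 1, 0, 0)),
--     'BUILD': ((1, 1, 1, 0), (0, 0, 1, 0)),
--     'PATCH': ((1, 1, 1, 1), (0, 0, 0, 1)),
-- }
--
-- def incremented_version(version: tuple[int, int, int, int], update_type: str) -> tuple[int, int, int, int]: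
--     keep, bump = _MASKS[update_type]
--     return tuple(v * k + b for v, k, b in zip(version, keep, bump))
-- ===== Notes on version B (the rewrite author's own statement) =====
-- stated objective: alternative
-- what changed: Replaces the index lookup plus position loop with three-way branching by a precomputed mask table: each update type maps to (keep, bump) masks and the result is the branch-free elementwise v*keep + bump over zip.
import Mathlib
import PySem

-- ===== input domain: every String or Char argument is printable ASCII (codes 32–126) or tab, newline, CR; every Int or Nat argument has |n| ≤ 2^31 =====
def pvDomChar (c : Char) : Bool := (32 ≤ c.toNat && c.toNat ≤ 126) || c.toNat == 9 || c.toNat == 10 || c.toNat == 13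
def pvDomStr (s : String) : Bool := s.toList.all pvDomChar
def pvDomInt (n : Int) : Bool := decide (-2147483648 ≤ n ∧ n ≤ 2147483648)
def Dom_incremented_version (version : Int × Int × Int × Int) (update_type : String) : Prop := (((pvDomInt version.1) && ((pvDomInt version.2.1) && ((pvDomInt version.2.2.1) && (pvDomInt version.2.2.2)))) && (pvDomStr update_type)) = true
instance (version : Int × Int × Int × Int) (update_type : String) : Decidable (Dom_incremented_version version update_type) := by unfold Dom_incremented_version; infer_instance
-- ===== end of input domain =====

-- ===== PORT A =====
-- B replaces A's index lookup + position loop with branching by a (keep, bump) mask table and elementwise arithmetic (objective: alternative).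
-- VERSION_POSITIONS = ['MAJOR', 'MINOR', 'BUILD', 'PATCH']
def pvVERSION_POSITIONS : List String := ["MAJOR", "MINOR", "BUILD", "PATCH"]

-- tuple(new_version): the loop always produces a 4-element list; helper packs it back
def pvToTuple (xs : List Int) : Int × Int × Int × Int :=
  match xs with
  | [a, b, c, d] => (a, b, c, d)
  | _ => (0, 0, 0, 0)

-- A: update_pos = VERSION_POSITIONS.index(update_type); loop over range(len(version)) appending
def incremented_version (version : Int × Int × Int × Int) (update_type : String) : Int × Int × Int × Int :=
  let vs : List Int := [version.1, version.2.1, version.2.2.1, version.2.2.2]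
  match PySem.List.index? pvVERSION_POSITIONS update_type with
  | none => (0, 0, 0, 0)  -- Python raises ValueError here; excluded by Pre_
  | some update_pos =>
    let new_version :=
      (PySem.List.pyRange 0 (vs.length : Int) 1).foldl (fun acc i =>
        if i < (update_pos : Int) then acc ++ [PySem.List.pyGetD vs i 0]
        else if i = (update_pos : Int) then acc ++ [PySem.List.pyGetD vs i 0 + 1]
        else acc ++ [0]) []
    pvToTuple new_version

-- ===== PORT B =====
-- _MASKS: update type -> ((keep mask), (bump mask)); dict as insertion-ordered assoc list
def pvMASKS : PySem.Dict String ((Int × Int × Int × Int) × (Int × Int × Int × Int)) :=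
  PySem.Dict.ofList
    [("MAJOR", ((1, 0, 0, 0), (1, 0, 0, 0))),
     ("MINOR", ((1, 1, 0, 0), (0, 1, 0, 0))),
     ("BUILD", ((1, 1, 1, 0), (0, 0, 1, 0))),
     ("PATCH", ((1, 1, 1, 1), (0, 0, 0, 1)))]

-- B: keep, bump = _MASKS[update_type]; tuple(v*k + b for v, k, b in zip(version, keep, bump))
def incremented_version_alt (version : Int × Int × Int × Int) (update_type : String) : Int × Int × Int × Int :=
  match pvMASKS.get? update_type with
  | none => (0, 0, 0, 0)  -- Python raises KeyError here; excluded by Pre_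
  | some (keep, bump) =>
      (version.1 * keep.1 + bump.1,
       version.2.1 * keep.2.1 + bump.2.1,
       version.2.2.1 * keep.2.2.1 + bump.2.2.1,
       version.2.2.2 * keep.2.2.2 + bump.2.2.2)

-- ===== PRECONDITION & SPEC =====
-- Pre_: exactly the update types in VERSION_POSITIONS; on any other string A raises ValueError.
def Pre_incremented_version (version : Int × Int × Int × Int) (update_type : String) : Prop :=
  update_type ∈ pvVERSION_POSITIONS
instance (version : Int × Int × Int × Int) (update_type : String) : Decidable (Pre_incremented_version version update_type) := by unfold Pre_incremented_version; infer_instance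
def pvWitness_incremented_version : (Int × Int × Int × Int) × String := ((1, 2, 3, 4), "MINOR")

def Spec_incremented_version (version : Int × Int × Int × Int) (update_type : String) (out : Int × Int × Int × Int) : Prop := out = incremented_version_alt version update_type
instance (version : Int × Int × Int × Int) (update_type : String) (out : Int × Int × Int × Int) : Decidable (Spec_incremented_version version update_type out) := by unfold Spec_incremented_version; infer_instance

-- ===== CLAIM (what is proved, stated in full; the proofs are below) =====
def Claim_equal_incremented_version : Prop := ∀ (version : Int × Int × Int × Int) (update_type : String), Dom_incremented_version version update_type → Pre_incremented_version version update_type → Spec_incremented_version version update_type (incremented_version version update_type)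

-- ===== LEMMAS AND PROOFS =====

-- ===== VERDICT (by name: the statement is the Claim_ definition above) =====
theorem incremented_version_spec : Claim_equal_incremented_version := by
  intro v t _hd hpre
  unfold Pre_incremented_version at hpre
  unfold Spec_incremented_version
  obtain ⟨a, b, c, d⟩ := v
  fin_cases hpre <;>
    simp [incremented_version, incremented_version_alt, pvVERSION_POSITIONS, pvToTuple, pvMASKS,
      PySem.List.index?, PySem.List.pyRange, PySem.List.pyGetD, List.idxOf?, List.findIdx?_cons,
      List.range_succ, PySem.List.pyGet?, PySem.List.pyIdx?, PySem.Dict.ofList, PySem.Dict.get?,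
      PySem.Dict.empty, PySem.Dict.update, PySem.Dict.items, PySem.Dict.insert, List.find?, Option.map]
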